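-- pv_equiv track=rewrite | github.com/dreamseedai/dreamseed_monorepo | data_transformation_pipeline.py | _parse_insert_values
-- ===== SOURCE A (Python) =====
-- from typing import Dict, List, Optional, Tuple
--
-- def _parse_insert_values(values_string: str) -> List[str]:
--     """Parse INSERT VALUES string (simplified implementation)"""
--     # This is a simplified parser - in production, use a proper SQL parser
--     values = []
--     current_value = ""
--     in_quotes = False
--     quote_char = None
--     paren_count = 0
--
--     for char in values_string:
--         if char in ["'", '"'] and not in_quotes:
--             in_quotes = True
--             quote_char = char
--             current_value += char
--         elif char == quote_char and in_quotes:
--             in_quotes = False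
--             quote_char = None
--             current_value += char
--         elif char == '(' and not in_quotes:
--             paren_count += 1
--             current_value += char
--         elif char == ')' and not in_quotes:
--             paren_count -= 1
--             current_value += char
--         elif char == ',' and not in_quotes and paren_count == 0:
--             values.append(current_value.strip())
--             current_value = ""
--         else:
--             current_value += char
--
--     if current_value.strip():
--         values.append(current_value.strip())
--
--     return values
-- ===== SOURCE B (Python) =====
-- from typing import Dict, List, Optional, Tuple
--
-- def _parse_insert_values(values_string: str) -> List[str]:
--     """Two-phase parse: find top-level comma positions, then slice the string."""
--     commas = []
--     in_quotes = False
--     quote_char = None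
--     paren_count = 0
--     for i, char in enumerate(values_string):
--         if char in ("'", '"') and not in_quotes:
--             in_quotes = True
--             quote_char = char
--         elif char == quote_char and in_quotes:
--             in_quotes = False
--             quote_char = None
--         elif char == '(' and not in_quotes:
--             paren_count += 1
--         elif char == ')' and not in_quotes:
--             paren_count -= 1
--         elif char == ',' and not in_quotes and paren_count == 0:
--             commas.append(i)
--     bounds = [-1] + commas + [len(values_string)]
--     segs = [values_string[a + 1:b].strip() for a, b in zip(bounds, bounds[1:])]
--     if segs and not segs[-1]:
--         segs.pop()
--     return segs
-- ===== Notes on version B (the rewrite author's own statement) =====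
-- stated objective: alternative
-- what changed: Replaced A's per-character accumulator with a two-phase parse: one scan records the indices of top-level commas (outside quotes and parens), then the result is built by slicing the original string between consecutive boundaries, stripping each slice, and dropping only a trailing empty segment.
import Mathlib
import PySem

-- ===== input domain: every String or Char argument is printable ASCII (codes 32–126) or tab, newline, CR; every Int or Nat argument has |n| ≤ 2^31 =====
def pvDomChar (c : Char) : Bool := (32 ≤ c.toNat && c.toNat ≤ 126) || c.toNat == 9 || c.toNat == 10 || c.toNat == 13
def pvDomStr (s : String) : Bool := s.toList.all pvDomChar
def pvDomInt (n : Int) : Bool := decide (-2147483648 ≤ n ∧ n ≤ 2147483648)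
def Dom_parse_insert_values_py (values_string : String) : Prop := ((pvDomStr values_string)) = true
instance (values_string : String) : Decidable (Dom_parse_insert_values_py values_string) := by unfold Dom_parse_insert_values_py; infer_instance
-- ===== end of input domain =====

-- B re-decomposes A's one-pass accumulator into two phases — record top-level comma
-- indices, then slice the original string at those boundaries — same cost, different shape.

-- ===== PORT A =====
-- the for-loop of A: state (values, current_value, in_quotes, quote_char, paren_count);
-- at end of input, the trailing `if current_value.strip(): values.append(...)`.
def pvLoopA : List Char → List String → List Char → Bool → Option Char → Int → List String
  | [], values, cur, _, _, _ =>
      if PySem.Chars.strip cur ≠ [] then values ++ [String.ofList (PySem.Chars.strip cur)] else values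
  | c :: rest, values, cur, inq, qc, pc =>
      if (c = '\'' ∨ c = '"') ∧ inq = false then
        pvLoopA rest values (cur ++ [c]) true (some c) pc
      else if some c = qc ∧ inq = true then
        pvLoopA rest values (cur ++ [c]) false none pc
      else if c = '(' ∧ inq = false then
        pvLoopA rest values (cur ++ [c]) inq qc (pc + 1)
      else if c = ')' ∧ inq = false then
        pvLoopA rest values (cur ++ [c]) inq qc (pc - 1)
      else if c = ',' ∧ inq = false ∧ pc = 0 then
        pvLoopA rest (values ++ [String.ofList (PySem.Chars.strip cur)]) [] inq qc pc
      else
        pvLoopA rest values (cur ++ [c]) inq qc pc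

def parse_insert_values_py (values_string : String) : List String :=
  pvLoopA values_string.toList [] [] false none 0

-- ===== PORT B =====
-- phase 1 of B: same quote/paren state machine, but only RECORDS indices of top-level commas.
def pvLoopB : List (Int × Char) → List Int → Bool → Option Char → Int → List Int
  | [], commas, _, _, _ => commas
  | (i, c) :: rest, commas, inq, qc, pc =>
      if (c = '\'' ∨ c = '"') ∧ inq = false then
        pvLoopB rest commas true (some c) pc
      else if some c = qc ∧ inq = true then
        pvLoopB rest commas false none pc
      else if c = '(' ∧ inq = false then
        pvLoopB rest commas inq qc (pc + 1)
      else if c = ')' ∧ inq = false then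
        pvLoopB rest commas inq qc (pc - 1)
      else if c = ',' ∧ inq = false ∧ pc = 0 then
        pvLoopB rest (commas ++ [i]) inq qc pc
      else
        pvLoopB rest commas inq qc pc

-- phase 2 of B: slice between consecutive boundaries, strip, drop a trailing empty segment.
def parse_insert_values_py_alt (values_string : String) : List String :=
  let cs := values_string.toList
  let commas := pvLoopB (PySem.List.enumerate cs 0) [] false none 0
  let bounds : List Int := -1 :: (commas ++ [PySem.Str.len values_string])
  let segs := (bounds.zip bounds.tail).map
    (fun ab => String.ofList (PySem.Chars.strip (PySem.List.slice cs (some (ab.1 + 1)) (some ab.2))))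
  if segs ≠ [] ∧ segs.getLast? = some "" then segs.dropLast else segs

-- ===== PRECONDITION & SPEC =====
def Spec_parse_insert_values_py (values_string : String) (out : List String) : Prop := out = parse_insert_values_py_alt values_string
instance (values_string : String) (out : List String) : Decidable (Spec_parse_insert_values_py values_string out) := by unfold Spec_parse_insert_values_py; infer_instance

-- ===== CLAIM (what is proved, stated in full; the proofs are below) =====
def Claim_equal_parse_insert_values_py : Prop := ∀ (values_string : String), Dom_parse_insert_values_py values_string → Spec_parse_insert_values_py values_string (parse_insert_values_py values_string)

-- ===== LEMMAS AND PROOFS =====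

-- reference splitter: the raw (unstripped) top-level segments of the input
def pvMapHead (f : List Char → List Char) : List (List Char) → List (List Char)
  | [] => []
  | s :: ss => f s :: ss

def pvSegs : List Char → Bool → Option Char → Int → List (List Char)
  | [], _, _, _ => [[]]
  | c :: rest, inq, qc, pc =>
      if (c = '\'' ∨ c = '"') ∧ inq = false then
        pvMapHead (c :: ·) (pvSegs rest true (some c) pc)
      else if some c = qc ∧ inq = true then
        pvMapHead (c :: ·) (pvSegs rest false none pc)
      else if c = '(' ∧ inq = false then
        pvMapHead (c :: ·) (pvSegs rest inq qc (pc + 1))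
      else if c = ')' ∧ inq = false then
        pvMapHead (c :: ·) (pvSegs rest inq qc (pc - 1))
      else if c = ',' ∧ inq = false ∧ pc = 0 then
        [] :: pvSegs rest inq qc pc
      else
        pvMapHead (c :: ·) (pvSegs rest inq qc pc)

-- comma positions of the segment list, starting at absolute index i0
def pvPosns : Int → List (List Char) → List Int
  | _, [] => []
  | _, [_] => []
  | i0, s :: t :: r => (i0 + (s.length : Int)) :: pvPosns (i0 + (s.length : Int) + 1) (t :: r)

-- join the segments back with commas
def pvJoin : List (List Char) → List Char
  | [] => []
  | [s] => s
  | s :: t :: r => s ++ ',' :: pvJoin (t :: r)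

-- strip/collect final step applied to a segment list (what A's output is)
def pvFinish (segs : List (List Char)) : List String :=
  segs.dropLast.map (fun s => String.ofList (PySem.Chars.strip s)) ++
    (match segs.getLast? with
     | some last => if PySem.Chars.strip last ≠ [] then [String.ofList (PySem.Chars.strip last)] else []
     | none => [])

theorem pvMapHead_ne_nil (f : List Char → List Char) (ss : List (List Char)) (h : ss ≠ []) :
    pvMapHead f ss ≠ [] := by
  cases ss with
  | nil => exact absurd rfl h
  | cons t r => simp [pvMapHead]

theorem pvSegs_ne_nil (l : List Char) (inq : Bool) (qc : Option Char) (pc : Int) :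
    pvSegs l inq qc pc ≠ [] := by
  induction l generalizing inq qc pc with
  | nil => simp [pvSegs]
  | cons c rest ih =>
      simp only [pvSegs]
      split_ifs <;> first | exact pvMapHead_ne_nil _ _ (ih _ _ _) | simp

theorem pvMapHead_comp (cur : List Char) (c : Char) (ss : List (List Char)) :
    pvMapHead (cur ++ ·) (pvMapHead (c :: ·) ss) = pvMapHead ((cur ++ [c]) ++ ·) ss := by
  cases ss <;> simp [pvMapHead]

theorem pvMapHead_nil (ss : List (List Char)) : pvMapHead (([] : List Char) ++ ·) ss = ss := by
  cases ss <;> simp [pvMapHead]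

theorem pvFinish_cons (s : List Char) (ss : List (List Char)) (h : ss ≠ []) :
    pvFinish (s :: ss) = String.ofList (PySem.Chars.strip s) :: pvFinish ss := by
  cases ss with
  | nil => exact absurd rfl h
  | cons t r => simp [pvFinish, List.getLast?_cons_cons, List.dropLast_cons₂]

theorem pvLoopA_eq (l : List Char) :
    ∀ (values : List String) (cur : List Char) (inq : Bool) (qc : Option Char) (pc : Int),
    pvLoopA l values cur inq qc pc = values ++ pvFinish (pvMapHead (cur ++ ·) (pvSegs l inq qc pc)) := by
  induction l with
  | nil =>
      intro values cur inq qc pc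
      simp only [pvLoopA, pvSegs, pvMapHead, List.append_nil]
      have hf : pvFinish [cur] = if PySem.Chars.strip cur ≠ [] then
          [String.ofList (PySem.Chars.strip cur)] else [] := rfl
      rw [hf]
      split_ifs with h <;> simp
  | cons c rest ih =>
      intro values cur inq qc pc
      simp only [pvLoopA, pvSegs]
      split_ifs with h1 h2 h3 h4 h5
      · rw [ih, pvMapHead_comp]
      · rw [ih, pvMapHead_comp]
      · rw [ih, pvMapHead_comp]
      · rw [ih, pvMapHead_comp]
      · rw [ih, pvMapHead_nil]
        show _ = values ++ pvFinish (pvMapHead (cur ++ ·) ([] :: pvSegs rest inq qc pc))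
        rw [show pvMapHead (cur ++ ·) ([] :: pvSegs rest inq qc pc)
              = cur :: pvSegs rest inq qc pc by simp [pvMapHead]]
        rw [pvFinish_cons _ _ (pvSegs_ne_nil rest inq qc pc)]
        simp
      · rw [ih, pvMapHead_comp]

theorem pvPosns_mapHead (i0 : Int) (c : Char) (ss : List (List Char)) :
    pvPosns i0 (pvMapHead (c :: ·) ss) = pvPosns (i0 + 1) ss := by
  match ss with
  | [] => simp [pvMapHead, pvPosns]
  | [s] => simp [pvMapHead, pvPosns]
  | s :: t :: r =>
      simp only [pvMapHead, pvPosns, List.length_cons]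
      rw [List.cons.injEq]
      refine ⟨by push_cast; ring, ?_⟩
      congr 1
      push_cast
      ring

theorem pvLoopB_eq (l : List Char) :
    ∀ (i0 : Int) (commas : List Int) (inq : Bool) (qc : Option Char) (pc : Int),
    pvLoopB (PySem.List.enumerate l i0) commas inq qc pc
      = commas ++ pvPosns i0 (pvSegs l inq qc pc) := by
  induction l with
  | nil => intro i0 commas inq qc pc; simp [PySem.List.enumerate, pvLoopB, pvSegs, pvPosns]
  | cons c rest ih =>
      intro i0 commas inq qc pc
      rw [PySem.List.enumerate_cons]
      simp only [pvLoopB, pvSegs]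
      split_ifs with h1 h2 h3 h4 h5
      · rw [ih, pvPosns_mapHead]
      · rw [ih, pvPosns_mapHead]
      · rw [ih, pvPosns_mapHead]
      · rw [ih, pvPosns_mapHead]
      · rw [ih]
        rw [show pvPosns i0 ([] :: pvSegs rest inq qc pc)
              = i0 :: pvPosns (i0 + 1) (pvSegs rest inq qc pc) by
          match hs : pvSegs rest inq qc pc with
          | [] => exact absurd hs (pvSegs_ne_nil rest inq qc pc)
          | t :: r => simp [pvPosns]]
        simp
      · rw [ih, pvPosns_mapHead]

theorem pvJoin_mapHead (c : Char) (ss : List (List Char)) (h : ss ≠ []) :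
    pvJoin (pvMapHead (c :: ·) ss) = c :: pvJoin ss := by
  match ss with
  | [s] => simp [pvMapHead, pvJoin]
  | s :: t :: r => simp [pvMapHead, pvJoin]

theorem pvJoin_segs (l : List Char) (inq : Bool) (qc : Option Char) (pc : Int) :
    pvJoin (pvSegs l inq qc pc) = l := by
  induction l generalizing inq qc pc with
  | nil => simp [pvSegs, pvJoin]
  | cons c rest ih =>
      simp only [pvSegs]
      split_ifs with h1 h2 h3 h4 h5 <;>
        first
          | rw [pvJoin_mapHead _ _ (pvSegs_ne_nil rest _ _ _), ih]
          | skip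
      -- comma branch remains
      obtain ⟨hc, _, _⟩ := h5
      subst hc
      rw [show pvJoin ([] :: pvSegs rest inq qc pc) = ',' :: pvJoin (pvSegs rest inq qc pc) by
        match hs : pvSegs rest inq qc pc with
        | [] => exact absurd hs (pvSegs_ne_nil rest inq qc pc)
        | t :: r => simp [pvJoin]]
      rw [ih]

theorem pvSlices_eq (segs : List (List Char)) :
    ∀ (pre : List Char), segs ≠ [] →
    (let cs := pre ++ pvJoin segs
     let bnds : List Int := ((pre.length : Int) - 1) ::
       (pvPosns (pre.length : Int) segs ++ [(cs.length : Int)])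
     (bnds.zip bnds.tail).map
       (fun ab => PySem.List.slice cs (some (ab.1 + 1)) (some ab.2))) = segs := by
  induction segs with
  | nil => intro pre h; exact absurd rfl h
  | cons s ss ih =>
      intro pre _
      match ss with
      | [] =>
          simp only [pvJoin, pvPosns, List.nil_append, List.zip_cons_cons, List.tail_cons,
            List.zip_nil_right, List.map_cons, List.map_nil]
          rw [show (pre.length : Int) - 1 + 1 = ((pre.length : Nat) : Int) by ring,
              show ((pre ++ s).length : Int) = ((pre.length : Nat) : Int) + ((s.length : Nat) : Int) by
                simp,
              PySem.List.slice_natCast_add]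
          simp
      | t :: r =>
          have ihr := ih (pre ++ s ++ [',']) (by simp)
          simp only at ihr
          simp only [pvPosns, pvJoin, List.cons_append, List.zip_cons_cons, List.tail_cons,
            List.map_cons]
          rw [List.cons.injEq]
          refine ⟨?_, ?_⟩
          · rw [show (pre.length : Int) - 1 + 1 = ((pre.length : Nat) : Int) by ring,
                PySem.List.slice_natCast_add]
            rw [List.drop_left, List.take_left]
          · have e1 : ((pre ++ s ++ [',']).length : Int)
                = (pre.length : Int) + (s.length : Int) + 1 := by
              simp [List.length_append]
              omega
            have e2 : pre ++ s ++ [','] ++ pvJoin (t :: r)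
                = pre ++ (s ++ ',' :: pvJoin (t :: r)) := by simp
            rw [e2, e1] at ihr
            rw [show (pre.length : Int) + (s.length : Int) + 1 - 1
                  = (pre.length : Int) + (s.length : Int) by ring] at ihr
            simp only [List.tail_cons] at ihr
            exact ihr

-- A's final collection versus B's trailing-empty pop, on segs = init ++ [last]
theorem pvFinal (segs : List (List Char)) (h : segs ≠ []) :
    pvFinish segs =
      (if (segs.map (fun s => String.ofList (PySem.Chars.strip s))) ≠ [] ∧
          (segs.map (fun s => String.ofList (PySem.Chars.strip s))).getLast? = some "" then
        (segs.map (fun s => String.ofList (PySem.Chars.strip s))).dropLast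
      else segs.map (fun s => String.ofList (PySem.Chars.strip s))) := by
  obtain ⟨init, last, rfl⟩ := (List.eq_nil_or_concat segs).resolve_left h
  simp only [List.concat_eq_append, List.map_append, List.map_cons, List.map_nil]
  by_cases hl : PySem.Chars.strip last = []
  · rw [if_pos ⟨by simp, by rw [List.getLast?_concat, hl]⟩]
    simp [pvFinish, List.getLast?_concat, List.dropLast_concat, hl]
  · rw [if_neg (by
      rintro ⟨-, h2⟩
      rw [List.getLast?_concat] at h2
      injection h2 with h3
      exact hl (by simpa using congrArg String.toList h3))]
    simp [pvFinish, List.getLast?_concat, List.dropLast_concat, hl]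

-- ===== VERDICT (by name: the statement is the Claim_ definition above) =====
theorem parse_insert_values_py_spec : Claim_equal_parse_insert_values_py := by
  intro s _
  unfold Spec_parse_insert_values_py
  simp only [parse_insert_values_py, parse_insert_values_py_alt]
  rw [pvLoopA_eq, pvMapHead_nil, List.nil_append, pvLoopB_eq, List.nil_append]
  have hne := pvSegs_ne_nil s.toList false none 0
  have hsl := pvSlices_eq (pvSegs s.toList false none 0) [] hne
  simp only [List.nil_append, List.length_nil, Nat.cast_zero, pvJoin_segs] at hsl
  have hb : ((-1 : Int) :: (pvPosns 0 (pvSegs s.toList false none 0) ++ [PySem.Str.len s]))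
      = (((0 : Int) - 1) :: (pvPosns 0 (pvSegs s.toList false none 0) ++ [(s.toList.length : Int)])) := by
    norm_num [PySem.Str.len_eq, String.length_toList]
  rw [hb]
  rw [show (fun ab : Int × Int =>
        String.ofList (PySem.Chars.strip (PySem.List.slice s.toList (some (ab.1 + 1)) (some ab.2))))
      = (fun t => String.ofList (PySem.Chars.strip t)) ∘
        (fun ab : Int × Int => PySem.List.slice s.toList (some (ab.1 + 1)) (some ab.2)) from rfl]
  rw [← List.map_map, hsl]
  exact pvFinal _ hne
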